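-- pv_equiv track=rewrite | github.com/kousalyaa13/codepath_tip | session_1/advanced_set_1/problem_3.py | tiggerfy
-- ===== SOURCE A (Python) =====
-- def tiggerfy(word):
--     # Convert to lowercase for matching, but keep original for output
--     result = ""
--     i = 0
--     lower_word = word.lower()
--     while i < len(word):
--         # Check for "gg"
--         if lower_word[i:i+2] == "gg":
--             i += 2
--         # Check for "er"
--         elif lower_word[i:i+2] == "er":
--             i += 2
--         # Check for "t"
--         elif lower_word[i] == "t":
--             i += 1
--         # Check for "i"
--         elif lower_word[i] == "i":
--             i += 1
--         else:
--             result += word[i]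
--             i += 1
--     return result
-- ===== SOURCE B (Python) =====
-- def tiggerfy(word):
--     # One-pass state machine: hold a pending 'g'/'e' (original case) that may
--     # start a removable "gg"/"er" pair; no index arithmetic, no slicing.
--     out = []
--     pending = None
--     for c in word:
--         l = c.lower()
--         if pending is not None:
--             pl = pending.lower()
--             if (pl == 'g' and l == 'g') or (pl == 'e' and l == 'r'):
--                 pending = None
--                 continue
--             out.append(pending)
--             pending = None
--         if l == 't' or l == 'i':
--             continue
--         if l == 'g' or l == 'e':
--             pending = c
--         else:
--             out.append(c)
--     if pending is not None:
--         out.append(pending)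
--     return ''.join(out)
-- ===== Notes on version B (the rewrite author's own statement) =====
-- stated objective: alternative
-- what changed: Replaces A's index-based scan with two-character slicing and re-lowercasing of the whole word by a single left-to-right fold over the characters that keeps a one-character pending state (a 'g' or 'e' that may start a removable pair), so no index arithmetic or slices are needed.
import Mathlib
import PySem

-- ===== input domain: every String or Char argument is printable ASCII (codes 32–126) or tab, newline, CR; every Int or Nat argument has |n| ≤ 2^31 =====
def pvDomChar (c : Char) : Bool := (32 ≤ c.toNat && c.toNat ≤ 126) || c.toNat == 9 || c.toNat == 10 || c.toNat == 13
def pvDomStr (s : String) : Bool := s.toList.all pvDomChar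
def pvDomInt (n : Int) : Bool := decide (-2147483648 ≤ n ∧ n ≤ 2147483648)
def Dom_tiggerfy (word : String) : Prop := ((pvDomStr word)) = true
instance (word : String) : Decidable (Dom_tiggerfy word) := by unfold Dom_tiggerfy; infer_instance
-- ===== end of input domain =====

-- B replaces A's index/slice scan by a one-pass state machine holding a pending 'g'/'e'; alternative decomposition, same cost.


-- ===== PORT A =====
-- the while loop; `result += word[i]` appends word[i], always in range since i < len(word)
def tiggerfyLoop (wl ll : List Char) (i : Nat) (result : List Char) : List Char :=
  if i < wl.length then
    if PySem.List.slice ll (some (i : Int)) (some ((i : Int) + 2)) = ['g', 'g'] then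
      tiggerfyLoop wl ll (i + 2) result
    else if PySem.List.slice ll (some (i : Int)) (some ((i : Int) + 2)) = ['e', 'r'] then
      tiggerfyLoop wl ll (i + 2) result
    else if PySem.List.pyGet? ll (i : Int) = some 't' then
      tiggerfyLoop wl ll (i + 1) result
    else if PySem.List.pyGet? ll (i : Int) = some 'i' then
      tiggerfyLoop wl ll (i + 1) result
    else
      tiggerfyLoop wl ll (i + 1) (result ++ (PySem.List.pyGet? wl (i : Int)).toList)
  else result
termination_by wl.length - i

def tiggerfy (word : String) : String :=
  String.ofList (tiggerfyLoop word.toList (PySem.Chars.lower word.toList) 0 [])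

-- ===== PORT B =====
-- the loop body after the pending char was dealt with ('continue' / hold / append)
def tiggerfyTail (l c : Char) (out : List Char) : Option Char × List Char :=
  if l = 't' ∨ l = 'i' then (none, out)
  else if l = 'g' ∨ l = 'e' then (some c, out)
  else (none, out ++ [c])

def tiggerfyStep (st : Option Char × List Char) (c : Char) : Option Char × List Char :=
  let l := PySem.Chars.lowerChar c
  match st with
  | (some p, out) =>
    let pl := PySem.Chars.lowerChar p
    if (pl = 'g' ∧ l = 'g') ∨ (pl = 'e' ∧ l = 'r') then (none, out)
    else tiggerfyTail l c (out ++ [p])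
  | (none, out) => tiggerfyTail l c out

def tiggerfy_alt (word : String) : String :=
  let st := word.toList.foldl tiggerfyStep (none, [])
  String.ofList (st.2 ++ st.1.toList)

-- ===== PRECONDITION & SPEC =====
def Spec_tiggerfy (word : String) (out : String) : Prop := out = tiggerfy_alt word
instance (word : String) (out : String) : Decidable (Spec_tiggerfy word out) := by unfold Spec_tiggerfy; infer_instance

-- ===== CLAIM (what is proved, stated in full; the proofs are below) =====
def Claim_equal_tiggerfy : Prop := ∀ (word : String), Dom_tiggerfy word → Spec_tiggerfy word (tiggerfy word)

-- ===== LEMMAS AND PROOFS =====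
def tigFinish (st : Option Char × List Char) : List Char := st.2 ++ st.1.toList

theorem tigStep_out (p : Option Char) (out : List Char) (c : Char) :
    tiggerfyStep (p, out) c =
      ((tiggerfyStep (p, []) c).1, out ++ (tiggerfyStep (p, []) c).2) := by
  cases p <;> simp [tiggerfyStep, tiggerfyTail] <;> split_ifs <;> simp

theorem tigFoldl_out (l : List Char) (p : Option Char) (out : List Char) :
    tigFinish (l.foldl tiggerfyStep (p, out)) =
      out ++ tigFinish (l.foldl tiggerfyStep (p, [])) := by
  induction l generalizing p out with
  | nil => simp [tigFinish]
  | cons c l ih =>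
    simp only [List.foldl_cons]
    rw [tigStep_out p out c, ih, ih (tiggerfyStep (p, []) c).1 (tiggerfyStep (p, []) c).2,
      List.append_assoc]

-- a pending char whose pair does not complete is flushed to the output
theorem tigPend_flush (rest : List Char) (p : Char)
    (h : ∀ c ts, rest = c :: ts →
      ¬ ((PySem.Chars.lowerChar p = 'g' ∧ PySem.Chars.lowerChar c = 'g') ∨
         (PySem.Chars.lowerChar p = 'e' ∧ PySem.Chars.lowerChar c = 'r'))) :
    tigFinish (rest.foldl tiggerfyStep (some p, [])) =
      p :: tigFinish (rest.foldl tiggerfyStep (none, [])) := by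
  cases rest with
  | nil => simp [tigFinish]
  | cons c ts =>
    simp only [List.foldl_cons]
    have hs : tiggerfyStep (some p, []) c = tiggerfyStep (none, [p]) c := by
      simp only [tiggerfyStep]
      rw [if_neg (h c ts rfl)]
      simp
    rw [hs, tigStep_out none [p] c,
      show tiggerfyStep (none, []) c = ((tiggerfyStep (none, []) c).1, (tiggerfyStep (none, []) c).2) from rfl,
      tigFoldl_out ts _ ([p] ++ (tiggerfyStep (none, []) c).2),
      tigFoldl_out ts (tiggerfyStep (none, []) c).1 (tiggerfyStep (none, []) c).2]
    simp

theorem tig_main (wl : List Char) : ∀ (n i : Nat) (res : List Char), wl.length - i ≤ n →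
    tiggerfyLoop wl (wl.map PySem.Chars.lowerChar) i res =
      res ++ tigFinish ((wl.drop i).foldl tiggerfyStep (none, [])) := by
  intro n
  induction n with
  | zero =>
    intro i res h
    have hi : ¬ i < wl.length := by omega
    rw [tiggerfyLoop, if_neg hi, List.drop_eq_nil_of_le (by omega)]
    simp [tigFinish]
  | succ n ih =>
    intro i res h
    by_cases hi : i < wl.length
    · have hdrop : wl.drop i = wl[i] :: wl.drop (i + 1) := List.drop_eq_getElem_cons hi
      have hslice : PySem.List.slice (wl.map PySem.Chars.lowerChar) (some (i : Int)) (some ((i : Int) + 2)) =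
          ((wl.map PySem.Chars.lowerChar).drop i).take 2 := by
        rw [show ((i : Int) + 2) = ((i + 2 : Nat) : Int) by push_cast; ring,
          PySem.List.slice_natCast]
        congr 1; omega
      have hget : PySem.List.pyGet? (wl.map PySem.Chars.lowerChar) (i : Int) =
          some (PySem.Chars.lowerChar wl[i]) := by
        rw [PySem.List.pyGet?_natCast]
        simp [hi]
      have hgetw : PySem.List.pyGet? wl (i : Int) = some wl[i] := by
        rw [PySem.List.pyGet?_natCast]; simp [hi]
      set c := wl[i] with hc
      rw [tiggerfyLoop, if_pos hi, hslice]
      have hdm : (wl.map PySem.Chars.lowerChar).drop i = (wl.drop i).map PySem.Chars.lowerChar := by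
        rw [List.map_drop]
      rw [hdm, hdrop]
      -- case analysis on the tail
      cases htail : wl.drop (i + 1) with
      | nil =>
        -- only one char left
        have hd2 : wl.drop (i + 2) = [] := by
          have := congrArg (List.drop 1) htail
          simpa [List.drop_drop] using this
        simp only [List.map_cons, List.map_nil, List.take]
        by_cases hg : PySem.Chars.lowerChar c = 'g'
        · rw [if_neg (by simp [hg]), if_neg (by simp [hg]), hget,
            if_neg (by simp [hg]), if_neg (by simp [hg])]
          rw [ih (i+1) _ (by omega), htail]
          simp [tigFinish, tiggerfyStep, tiggerfyTail, hg, hgetw]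
        · by_cases he : PySem.Chars.lowerChar c = 'e'
          · rw [if_neg (by simp [hg]), if_neg (by simp [he]), hget,
              if_neg (by simp [he]), if_neg (by simp [he])]
            rw [ih (i+1) _ (by omega), htail]
            simp [tigFinish, tiggerfyStep, tiggerfyTail, he, hgetw]
          · by_cases ht : PySem.Chars.lowerChar c = 't'
            · rw [if_neg (by simp [hg]), if_neg (by simp [he]), hget, if_pos (by simp [ht])]
              rw [ih (i+1) _ (by omega), htail]
              simp [tigFinish, tiggerfyStep, tiggerfyTail, ht]
            · by_cases hii : PySem.Chars.lowerChar c = 'i'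
              · rw [if_neg (by simp [hg]), if_neg (by simp [he]), hget,
                  if_neg (by simp [ht]), if_pos (by simp [hii])]
                rw [ih (i+1) _ (by omega), htail]
                simp [tigFinish, tiggerfyStep, tiggerfyTail, hii]
              · rw [if_neg (by simp [hg]), if_neg (by simp [he]), hget,
                  if_neg (by simp [ht]), if_neg (by simp [hii])]
                rw [ih (i+1) _ (by omega), htail, hgetw]
                simp [tigFinish, tiggerfyStep, tiggerfyTail, hg, he, ht, hii]
      | cons c2 ts =>
        have hd2 : wl.drop (i + 2) = ts := by
          have := congrArg (List.drop 1) htail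
          simpa [List.drop_drop] using this
        simp only [List.map_cons, List.take]
        by_cases hgg : PySem.Chars.lowerChar c = 'g' ∧ PySem.Chars.lowerChar c2 = 'g'
        · rw [if_pos (by simp [hgg.1, hgg.2]), ih (i+2) _ (by omega), hd2]
          simp [List.foldl_cons, tiggerfyStep, tiggerfyTail, hgg.1, hgg.2]
        · by_cases her : PySem.Chars.lowerChar c = 'e' ∧ PySem.Chars.lowerChar c2 = 'r'
          · rw [if_neg (by simp; intro h1 h2; exact absurd ⟨h1, h2⟩ hgg),
              if_pos (by simp [her.1, her.2]), ih (i+2) _ (by omega), hd2]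
            simp [List.foldl_cons, tiggerfyStep, tiggerfyTail, her.1, her.2]
          · -- no pair removed at i
            rw [if_neg (by simp; intro h1 h2; exact absurd ⟨h1, h2⟩ hgg),
              if_neg (by simp; intro h1 h2; exact absurd ⟨h1, h2⟩ her), hget]
            by_cases ht : PySem.Chars.lowerChar c = 't'
            · rw [if_pos (by simp [ht]), ih (i+1) _ (by omega), htail]
              simp [List.foldl_cons, tiggerfyStep, tiggerfyTail, ht]
            · by_cases hii : PySem.Chars.lowerChar c = 'i'
              · rw [if_neg (by simp [ht]), if_pos (by simp [hii]),
                  ih (i+1) _ (by omega), htail]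
                simp [List.foldl_cons, tiggerfyStep, tiggerfyTail, hii]
              · rw [if_neg (by simp [ht]), if_neg (by simp [hii]),
                  ih (i+1) _ (by omega), htail, hgetw]
                by_cases hge : PySem.Chars.lowerChar c = 'g' ∨ PySem.Chars.lowerChar c = 'e'
                · -- pending char flushed before c2
                  have hstep : (c :: c2 :: ts).foldl tiggerfyStep (none, []) =
                      (c2 :: ts).foldl tiggerfyStep (some c, []) := by
                    simp [List.foldl_cons, tiggerfyStep, tiggerfyTail, ht, hii, hge]
                  rw [hstep, tigPend_flush]
                  · simp
                  · intro c' ts' heq hcon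
                    cases heq
                    rcases hcon with ⟨h1, h2⟩ | ⟨h1, h2⟩
                    · exact hgg ⟨h1, h2⟩
                    · exact her ⟨h1, h2⟩
                · -- ordinary char, appended by both
                  rw [not_or] at hge
                  have hc1 : (c :: c2 :: ts).foldl tiggerfyStep (none, []) =
                      (c2 :: ts).foldl tiggerfyStep (none, [c]) := by
                    simp [List.foldl_cons, tiggerfyStep, tiggerfyTail, ht, hii, hge.1, hge.2]
                  rw [hc1, tigFoldl_out (c2 :: ts) none [c]]
                  simp
    · rw [tiggerfyLoop, if_neg hi, List.drop_eq_nil_of_le (by omega)]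
      simp [tigFinish]

-- ===== VERDICT (by name: the statement is the Claim_ definition above) =====
theorem tiggerfy_spec : Claim_equal_tiggerfy := by
  intro word _
  unfold Spec_tiggerfy tiggerfy tiggerfy_alt
  rw [show PySem.Chars.lower word.toList = word.toList.map PySem.Chars.lowerChar by
    simp [PySem.Chars.lower]]
  rw [tig_main word.toList word.toList.length 0 [] (by omega)]
  simp [tigFinish]
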